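-- pv_equiv track=rewrite | github.com/Mansour-alhutaylah/hemaya-policy-ai1 | backend/sacs002_analyzer.py | _sacs002_expand_neighbors
-- ===== SOURCE A (Python) =====
-- def _sacs002_expand_neighbors(
--     selected_chunks: list[dict],
--     all_chunks: list[dict],
--     window: int = 1,
-- ) -> list[dict]:
--     """Add preceding and following chunks to avoid evidence split across boundaries.
--
--     For each selected chunk at index i, includes chunks i-window … i+window.
--     Result is sorted by chunk_index (document order) and deduplicated.
--     """
--     chunk_by_idx = {c.get("chunk_index", -1): c for c in all_chunks}
--     seen: set[int] = set()
--     result: list[tuple[int, dict]] = []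
--     for c in selected_chunks:
--         base_idx = c.get("chunk_index", -1)
--         for offset in range(-window, window + 1):
--             idx = base_idx + offset
--             if idx >= 0 and idx not in seen:
--                 neighbor = chunk_by_idx.get(idx)
--                 if neighbor:
--                     seen.add(idx)
--                     result.append((idx, neighbor))
--     result.sort(key=lambda x: x[0])
--     return [c for _, c in result]
-- ===== SOURCE B (Python) =====
-- def _sacs002_expand_neighbors(
--     selected_chunks: list[dict],
--     all_chunks: list[dict],
--     window: int = 1,
-- ) -> list[dict]:
--     """Interval sweep: walk the distinct selected indices in sorted order and emit
--     each window [base-window, base+window] left to right, using a cursor to skip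
--     the already-covered prefix — no seen-set, no candidate sort, no final sort."""
--     chunk_by_idx = {c.get("chunk_index", -1): c for c in all_chunks}
--     result = []
--     cursor = 0
--     for base in sorted({c.get("chunk_index", -1) for c in selected_chunks}):
--         for i in range(max(base - window, cursor), base + window + 1):
--             neighbor = chunk_by_idx.get(i)
--             if neighbor:
--                 result.append(neighbor)
--         cursor = max(cursor, base + window + 1)
--     return result
-- ===== Notes on version B (the rewrite author's own statement) =====
-- stated objective: faster
-- what changed: Replaces A's per-candidate seen-set dedup plus final tuple-list sort by an interval sweep: sort the distinct selected base indices once, then walk each window [base-window, base+window] left to right with a cursor that skips the already-covered prefix, emitting chunks directly in document order (no seen-set, no (idx, dict) tuple list, no sort of the result).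
import Mathlib
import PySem

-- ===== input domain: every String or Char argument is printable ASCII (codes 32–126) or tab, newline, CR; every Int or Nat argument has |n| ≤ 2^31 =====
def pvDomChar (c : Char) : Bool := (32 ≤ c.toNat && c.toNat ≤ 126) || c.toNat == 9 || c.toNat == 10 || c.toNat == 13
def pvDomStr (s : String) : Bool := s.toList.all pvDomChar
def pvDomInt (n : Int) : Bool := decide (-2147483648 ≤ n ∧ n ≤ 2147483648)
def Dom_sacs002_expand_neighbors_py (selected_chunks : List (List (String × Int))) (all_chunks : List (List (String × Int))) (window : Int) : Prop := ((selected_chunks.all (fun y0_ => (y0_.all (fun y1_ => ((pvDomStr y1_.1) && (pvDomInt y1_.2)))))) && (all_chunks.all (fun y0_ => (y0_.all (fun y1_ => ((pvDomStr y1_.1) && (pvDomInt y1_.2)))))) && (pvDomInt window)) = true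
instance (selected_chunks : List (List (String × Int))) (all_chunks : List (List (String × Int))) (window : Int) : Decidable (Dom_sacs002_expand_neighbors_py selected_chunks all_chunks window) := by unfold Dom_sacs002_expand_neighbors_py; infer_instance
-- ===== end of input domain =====

-- B replaces A's seen-set dedup + final sort by an interval sweep: sorted distinct base indices,
-- each window emitted left to right with a cursor skipping the covered prefix (objective: alternative).

-- shared helper: c.get("chunk_index", -1) on a chunk dict (identical expression in both Pythons)
def pvChunkIdx (c : List (String × Int)) : Int := (PySem.Dict.mk c).getD "chunk_index" (-1)

-- shared helper: chunk_by_idx = {c.get("chunk_index", -1): c for c in all_chunks} (identical line in both Pythons)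
def pvChunkByIdx (all_chunks : List (List (String × Int))) : PySem.Dict Int (List (String × Int)) :=
  all_chunks.foldl (fun d c => d.insert (pvChunkIdx c) c) PySem.Dict.empty

-- ===== PORT A =====
-- body of A's inner loop for one idx = base_idx + offset: the idx ≥ 0 / not-seen guard,
-- the chunk_by_idx.get(idx) probe, the 'if neighbor:' truthiness test, then seen.add + result.append
def pvStepA (chunk_by_idx : PySem.Dict Int (List (String × Int)))
    (st : PySem.Set Int × List (Int × List (String × Int))) (idx : Int) :
    PySem.Set Int × List (Int × List (String × Int)) :=
  if 0 ≤ idx ∧ ¬ PySem.Set.contains st.1 idx then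
    match chunk_by_idx.get? idx with
    | some neighbor =>
        if neighbor ≠ [] then (PySem.Set.add st.1 idx, st.2 ++ [(idx, neighbor)]) else st
    | none => st
  else st

def sacs002_expand_neighbors_py (selected_chunks : List (List (String × Int))) (all_chunks : List (List (String × Int))) (window : Int) : List (List (String × Int)) :=
  let chunk_by_idx := pvChunkByIdx all_chunks
  let st : PySem.Set Int × List (Int × List (String × Int)) :=
    selected_chunks.foldl (fun st c =>
      (PySem.List.pyRange (-window) (window + 1) 1).foldl
        (fun st off => pvStepA chunk_by_idx st (pvChunkIdx c + off)) st)
      (PySem.Set.empty, [])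
  (PySem.List.sorted st.2 (fun p => p.1) false).map (fun p => p.2)

-- ===== PORT B =====
-- body of B's inner loop: neighbor = chunk_by_idx.get(i); if neighbor: result.append(neighbor)
def pvFetchB (chunk_by_idx : PySem.Dict Int (List (String × Int)))
    (r : List (List (String × Int))) (i : Int) : List (List (String × Int)) :=
  match chunk_by_idx.get? i with
  | some neighbor => if neighbor ≠ [] then r ++ [neighbor] else r
  | none => r

def sacs002_expand_neighbors_py_alt (selected_chunks : List (List (String × Int))) (all_chunks : List (List (String × Int))) (window : Int) : List (List (String × Int)) :=
  let chunk_by_idx := pvChunkByIdx all_chunks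
  -- for base in sorted({c.get("chunk_index", -1) for c in selected_chunks}): sweep with (cursor, result) state
  ((PySem.List.sorted (PySem.Set.ofList (selected_chunks.map pvChunkIdx) : List Int) (fun i => i) false).foldl
    (fun (st : Int × List (List (String × Int))) base =>
      (max st.1 (base + window + 1),
       (PySem.List.pyRange (max (base - window) st.1) (base + window + 1) 1).foldl
         (pvFetchB chunk_by_idx) st.2))
    (0, [])).2

-- ===== PRECONDITION & SPEC =====
def Spec_sacs002_expand_neighbors_py (selected_chunks : List (List (String × Int))) (all_chunks : List (List (String × Int))) (window : Int) (out : List (List (String × Int))) : Prop := out = sacs002_expand_neighbors_py_alt selected_chunks all_chunks window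
instance (selected_chunks : List (List (String × Int))) (all_chunks : List (List (String × Int))) (window : Int) (out : List (List (String × Int))) : Decidable (Spec_sacs002_expand_neighbors_py selected_chunks all_chunks window out) := by unfold Spec_sacs002_expand_neighbors_py; infer_instance

-- ===== CLAIM (what is proved, stated in full; the proofs are below) =====
def Claim_equal_sacs002_expand_neighbors_py : Prop := ∀ (selected_chunks : List (List (String × Int))) (all_chunks : List (List (String × Int))) (window : Int), Dom_sacs002_expand_neighbors_py selected_chunks all_chunks window → Spec_sacs002_expand_neighbors_py selected_chunks all_chunks window (sacs002_expand_neighbors_py selected_chunks all_chunks window)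

-- ===== LEMMAS AND PROOFS =====

-- the flattened candidate-index stream A's nested loop traverses
def pvCand (selected_chunks : List (List (String × Int))) (window : Int) : List Int :=
  selected_chunks.flatMap (fun c =>
    (PySem.List.pyRange (-window) (window + 1) 1).map (fun off => pvChunkIdx c + off))

-- the list of indices A actually appends (first occurrence order), as a recursion
def pvKeep (d : PySem.Dict Int (List (String × Int))) : List Int → PySem.Set Int → List Int
  | [], _ => []
  | i :: t, s =>
    if (0 ≤ i ∧ ¬ PySem.Set.contains s i) ∧ d.getD i [] ≠ [] then
      i :: pvKeep d t (PySem.Set.add s i)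
    else pvKeep d t s

-- the index stream B's sweep visits: each base's window clipped below by the cursor
def pvSweepIdx (w : Int) : List Int → Int → List Int
  | [], _ => []
  | b :: t, cur =>
      PySem.List.pyRange (max (b - w) cur) (b + w + 1) 1 ++ pvSweepIdx w t (max cur (b + w + 1))

lemma pvFoldA_eq (d : PySem.Dict Int (List (String × Int))) (sel : List (List (String × Int)))
    (window : Int) (st : PySem.Set Int × List (Int × List (String × Int))) :
    sel.foldl (fun st c =>
      (PySem.List.pyRange (-window) (window + 1) 1).foldl
        (fun st off => pvStepA d st (pvChunkIdx c + off)) st) st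
    = (pvCand sel window).foldl (pvStepA d) st := by
  induction sel generalizing st with
  | nil => simp [pvCand]
  | cons c t ih =>
      simp only [List.foldl_cons, pvCand, List.flatMap_cons, List.foldl_append, List.foldl_map]
      exact ih _

lemma pvFoldA_snd (d : PySem.Dict Int (List (String × Int))) :
    ∀ (cand : List Int) (s : PySem.Set Int) (r : List (Int × List (String × Int))),
    (cand.foldl (pvStepA d) (s, r)).2 = r ++ (pvKeep d cand s).map (fun i => (i, d.getD i [])) := by
  intro cand
  induction cand with
  | nil => intro s r; simp [pvKeep]
  | cons i t ih =>
      intro s r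
      simp only [List.foldl_cons, pvKeep]
      by_cases hg : 0 ≤ i ∧ i ∉ s
      · cases h : d.get? i with
        | none =>
            have hv : d.getD i [] = [] := PySem.Dict.getD_of_get?_eq_none _ _ h
            simp [pvStepA, hg, h, hv, ih]
        | some n =>
            have hv : d.getD i [] = n := PySem.Dict.getD_of_get?_eq_some _ _ h
            by_cases hn : n = []
            · simp [pvStepA, hg, h, hv, hn, ih]
            · simp [pvStepA, hg, h, hv, hn, ih]
      · simp [pvStepA, hg, ih]

lemma pvMem_pvKeep (d : PySem.Dict Int (List (String × Int))) :
    ∀ (cand : List Int) (s : PySem.Set Int) (j : Int),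
    j ∈ pvKeep d cand s ↔ j ∈ cand ∧ 0 ≤ j ∧ d.getD j [] ≠ [] ∧ j ∉ s := by
  intro cand
  induction cand with
  | nil => intro s j; simp [pvKeep]
  | cons i t ih =>
      intro s j
      simp only [pvKeep, PySem.Set.contains_iff]
      by_cases hc : (0 ≤ i ∧ i ∉ s) ∧ d.getD i [] ≠ []
      · rw [if_pos hc]
        have hins : i ∉ s := hc.1.2
        simp only [List.mem_cons, ih]
        constructor
        · rintro (rfl | ⟨hj, h0, hd, hns⟩)
          · exact ⟨Or.inl rfl, hc.1.1, hc.2, hins⟩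
          · refine ⟨Or.inr hj, h0, hd, fun hm => hns ?_⟩
            exact (PySem.Set.mem_add s i j).mpr (Or.inl hm)
        · rintro ⟨hj | hj, h0, hd, hns⟩
          · exact Or.inl hj
          · by_cases hji : j = i
            · exact Or.inl hji
            · refine Or.inr ⟨hj, h0, hd, fun hm => ?_⟩
              rcases (PySem.Set.mem_add s i j).mp hm with hm | hm
              · exact hns hm
              · exact hji hm
      · rw [if_neg hc]
        simp only [List.mem_cons, ih]
        constructor
        · rintro ⟨hj, h0, hd, hns⟩; exact ⟨Or.inr hj, h0, hd, hns⟩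
        · rintro ⟨hj | hj, h0, hd, hns⟩
          · subst hj
            exact absurd ⟨⟨h0, hns⟩, hd⟩ hc
          · exact ⟨hj, h0, hd, hns⟩

lemma pvKeep_nodup (d : PySem.Dict Int (List (String × Int))) :
    ∀ (cand : List Int) (s : PySem.Set Int), (pvKeep d cand s).Nodup := by
  intro cand
  induction cand with
  | nil => intro s; simp [pvKeep]
  | cons i t ih =>
      intro s
      simp only [pvKeep]
      split
      · refine List.Nodup.cons (fun hm => ?_) (ih _)
        have := ((pvMem_pvKeep d t (PySem.Set.add s i) i).mp hm).2.2.2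
        exact this ((PySem.Set.mem_add s i i).mpr (Or.inr rfl))
      · exact ih _

lemma pvMem_cand (sel : List (List (String × Int))) (w : Int) (i : Int) :
    i ∈ pvCand sel w ↔ ∃ c ∈ sel, pvChunkIdx c - w ≤ i ∧ i ≤ pvChunkIdx c + w := by
  simp only [pvCand, List.mem_flatMap, List.mem_map, PySem.List.mem_pyRange_one]
  constructor
  · rintro ⟨c, hc, off, ⟨h1, h2⟩, rfl⟩
    exact ⟨c, hc, by omega, by omega⟩
  · rintro ⟨c, hc, h1, h2⟩
    exact ⟨c, hc, i - pvChunkIdx c, ⟨by omega, by omega⟩, by omega⟩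

lemma pvFetchB_fold (d : PySem.Dict Int (List (String × Int))) :
    ∀ (xs : List Int) (r : List (List (String × Int))),
    xs.foldl (pvFetchB d) r
    = r ++ (xs.filter (fun i => decide (d.getD i [] ≠ []))).map (fun i => d.getD i []) := by
  intro xs
  induction xs with
  | nil => intro r; simp
  | cons i t ih =>
      intro r
      simp only [List.foldl_cons, List.filter_cons]
      cases h : d.get? i with
      | none =>
          have hv : d.getD i [] = [] := PySem.Dict.getD_of_get?_eq_none _ _ h
          simp [pvFetchB, h, hv, ih]
      | some n =>
          have hv : d.getD i [] = n := PySem.Dict.getD_of_get?_eq_some _ _ h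
          by_cases hn : n = []
          · simp [pvFetchB, h, hv, hn, ih]
          · simp [pvFetchB, h, hv, hn, ih]

lemma pvFoldB_snd (d : PySem.Dict Int (List (String × Int))) (w : Int) :
    ∀ (bs : List Int) (cur : Int) (r : List (List (String × Int))),
    (bs.foldl (fun (st : Int × List (List (String × Int))) b =>
        (max st.1 (b + w + 1),
         (PySem.List.pyRange (max (b - w) st.1) (b + w + 1) 1).foldl (pvFetchB d) st.2))
      (cur, r)).2
    = r ++ ((pvSweepIdx w bs cur).filter (fun i => decide (d.getD i [] ≠ []))).map
        (fun i => d.getD i []) := by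
  intro bs
  induction bs with
  | nil => intro cur r; simp [pvSweepIdx]
  | cons b t ih =>
      intro cur r
      simp only [List.foldl_cons, pvSweepIdx, List.filter_append, List.map_append]
      rw [ih, pvFetchB_fold, List.append_assoc]

lemma pvSweep_lb (w : Int) :
    ∀ (bs : List Int) (cur i : Int), i ∈ pvSweepIdx w bs cur → cur ≤ i := by
  intro bs
  induction bs with
  | nil => intro cur i h; simp [pvSweepIdx] at h
  | cons b t ih =>
      intro cur i h
      rcases List.mem_append.mp h with h | h
      · have := (PySem.List.mem_pyRange_one.mp h).1; omega
      · have := ih _ _ h; omega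

lemma pvMem_sweep (w : Int) :
    ∀ (bs : List Int), bs.Pairwise (· ≤ ·) → ∀ (cur i : Int),
    i ∈ pvSweepIdx w bs cur ↔ cur ≤ i ∧ ∃ b ∈ bs, b - w ≤ i ∧ i ≤ b + w := by
  intro bs
  induction bs with
  | nil => intro _ cur i; simp [pvSweepIdx]
  | cons b t ih =>
      intro hp cur i
      have hpt := (List.pairwise_cons.mp hp).2
      have hble := (List.pairwise_cons.mp hp).1
      simp only [pvSweepIdx, List.mem_append, PySem.List.mem_pyRange_one,
        ih hpt, List.mem_cons]
      constructor
      · rintro (⟨h1, h2⟩ | ⟨h1, b', hb', h2, h3⟩)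
        · exact ⟨by omega, b, Or.inl rfl, by omega, by omega⟩
        · exact ⟨by omega, b', Or.inr hb', h2, h3⟩
      · rintro ⟨hcur, b', hb' | hb', h2, h3⟩
        · subst hb'; exact Or.inl ⟨by omega, by omega⟩
        · have hbb' : b ≤ b' := hble _ hb'
          by_cases hle : i ≤ b + w
          · exact Or.inl ⟨by omega, by omega⟩
          · exact Or.inr ⟨by omega, b', hb', h2, h3⟩

lemma pvSweep_pairwise (w : Int) :
    ∀ (bs : List Int) (cur : Int), (pvSweepIdx w bs cur).Pairwise (· < ·) := by
  intro bs
  induction bs with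
  | nil => intro cur; simp [pvSweepIdx]
  | cons b t ih =>
      intro cur
      simp only [pvSweepIdx]
      refine List.pairwise_append.mpr ⟨PySem.List.pairwise_lt_pyRange_one _ _, ih _, ?_⟩
      intro x hx y hy
      have h1 := (PySem.List.mem_pyRange_one.mp hx).2
      have h2 := pvSweep_lb w t _ _ hy
      omega

lemma pvPairwise_lt_sorted (xs : List Int) (h : xs.Nodup) :
    (PySem.List.sorted xs (fun i => i) false).Pairwise (· < ·) := by
  have hle := PySem.List.sorted_pairwise xs (fun i => i)
  have hnd : (PySem.List.sorted xs (fun i => i) false).Nodup :=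
    (PySem.List.sorted_perm xs (fun i => i) false).nodup_iff.mpr h
  exact (hle.and hnd).imp (fun hp => lt_of_le_of_ne hp.1 hp.2)

-- ===== VERDICT (by name: the statement is the Claim_ definition above) =====
theorem sacs002_expand_neighbors_py_spec : Claim_equal_sacs002_expand_neighbors_py := by
  intro sel all window _
  unfold Spec_sacs002_expand_neighbors_py sacs002_expand_neighbors_py sacs002_expand_neighbors_py_alt
  simp only [pvFoldA_eq]
  set d := pvChunkByIdx all with hd
  set cand := pvCand sel window with hcand
  set bases := PySem.List.sorted (PySem.Set.ofList (sel.map pvChunkIdx) : List Int) (fun i => i) false with hbases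
  rw [pvFoldA_snd, pvFoldB_snd]
  set L := pvKeep d cand PySem.Set.empty with hL
  set S := (pvSweepIdx window bases 0).filter (fun i => decide (d.getD i [] ≠ [])) with hS
  have hLnd : L.Nodup := pvKeep_nodup d cand PySem.Set.empty
  have hbp : bases.Pairwise (· ≤ ·) :=
    (PySem.List.sorted_ofList_pairwise_lt (sel.map pvChunkIdx)).imp le_of_lt
  have hSpair : S.Pairwise (· < ·) :=
    List.Pairwise.sublist List.filter_sublist (pvSweep_pairwise window bases 0)
  have hSnd : S.Nodup := hSpair.imp ne_of_lt
  -- the sweep's surviving indices are exactly A's kept indices, in sorted order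
  have hsortL : PySem.List.sorted L (fun i => i) false = S := by
    apply PySem.List.sorted_eq_of_perm_of_pairwise_lt
    · rw [List.perm_ext_iff_of_nodup hSnd hLnd]
      intro j
      simp only [hS, List.mem_filter, pvMem_sweep window bases hbp, hL,
        pvMem_pvKeep, decide_eq_true_eq]
      have hbm : ∀ b : Int, b ∈ bases ↔ ∃ c ∈ sel, pvChunkIdx c = b := by
        intro b
        rw [hbases, PySem.List.mem_sorted, PySem.Set.mem_ofList]
        simp [List.mem_map, eq_comm]
      constructor
      · rintro ⟨⟨h0, b, hb, hlo, hhi⟩, hne⟩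
        rcases (hbm b).mp hb with ⟨c, hc, rfl⟩
        refine ⟨(pvMem_cand sel window j).mpr ⟨c, hc, hlo, hhi⟩, h0, hne, ?_⟩
        simp [PySem.Set.empty]
      · rintro ⟨hjc, h0, hne, -⟩
        rcases (pvMem_cand sel window j).mp hjc with ⟨c, hc, hlo, hhi⟩
        exact ⟨⟨h0, pvChunkIdx c, (hbm _).mpr ⟨c, hc, rfl⟩, hlo, hhi⟩, hne⟩
    · exact hSpair
  -- A's sort of (idx, chunk) pairs is the sorted index list mapped to pairs
  have hsortpair : PySem.List.sorted (L.map (fun i => (i, d.getD i []))) (fun p => p.1) false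
      = (PySem.List.sorted L (fun i => i) false).map (fun i => (i, d.getD i [])) := by
    apply PySem.List.sorted_eq_of_perm_of_pairwise_lt
    · exact (PySem.List.sorted_perm L (fun i => i) false).map _
    · exact List.Pairwise.map _ (fun a b h => h) (pvPairwise_lt_sorted L hLnd)
  rw [List.nil_append, hsortpair, hsortL, List.map_map, List.nil_append]
  rfl
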